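-- pv_equiv track=rewrite | github.com/louisabraham/mcSATan | utils/luby.py | luby
-- ===== SOURCE A (Python) =====
-- def luby(index):
--     """
--     implementation of https://pdfs.semanticscholar.org/2d0e/4df4de47ec38a2da161a850fd62164e62864.pdf
--     stolen from https://github.com/dddejan/CVC4/blob/mcsat-fmcad2013/src/mcsat/bcp/bcp_engine.cpp#L254
--     """
--     size = 1
--     maxPower = 0
--     while (size <= index):
--         size = 2 * size + 1
--         maxPower += 1
--     while (size > index + 1):
--         size = size // 2
--         maxPower -= 1
--         if (size <= index):
--             index -= size
--     return maxPower
-- ===== SOURCE B (Python) =====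
-- def luby(index):
--     # classic recursive Luby definition on j = index+1 over self-similar blocks
--     j = index + 1
--     k = 0
--     while (1 << k) - 1 < j:
--         k += 1
--     if j == (1 << k) - 1:
--         return k - 1
--     return luby(index - ((1 << (k - 1)) - 1))
-- ===== Notes on version B (the rewrite author's own statement) =====
-- stated objective: alternative
-- what changed: Replaces A's two imperative while-loops (grow the block size to the enclosing block, then repeatedly halve it while subtracting sub-blocks from the index) by the classic recursive Luby definition: find the smallest power-of-two block covering the one-based position, return its exponent at a block top, otherwise recurse on the position mapped into the previous block.
-- outside the precondition, e.g. on luby(-2): A does not finish within the time limit, B raises ValueError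
import Mathlib
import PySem

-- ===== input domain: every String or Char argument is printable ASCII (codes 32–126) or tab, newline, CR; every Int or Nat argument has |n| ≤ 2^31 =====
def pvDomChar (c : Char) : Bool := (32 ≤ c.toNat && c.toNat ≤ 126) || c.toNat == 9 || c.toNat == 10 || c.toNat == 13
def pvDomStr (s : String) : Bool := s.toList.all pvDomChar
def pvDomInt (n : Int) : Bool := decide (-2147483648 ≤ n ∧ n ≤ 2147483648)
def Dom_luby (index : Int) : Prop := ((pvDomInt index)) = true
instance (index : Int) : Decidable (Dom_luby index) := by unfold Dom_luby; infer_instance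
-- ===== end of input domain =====

-- B replaces A's grow-then-shrink iteration by the classic recursion on the Luby
-- sequence's self-similar block structure (objective: alternative, same cost class).

-- ===== PORT A =====
-- termination measure lemma for lubyLoop1 (cited by name in decreasing_by)
theorem lubyLoop1_dec (index : Int) (size : Nat) (h : (size : Int) ≤ index) :
    (index + 1 - ((2 * size + 1 : Nat) : Int)).toNat < (index + 1 - (size : Int)).toNat := by
  have h0 : (0:Int) ≤ (size : Int) := Int.natCast_nonneg _
  push_cast
  omega

-- first while loop of A: grow size = 2*size+1 until size > index
def lubyLoop1 (index : Int) (size : Nat) (maxPower : Int) : Nat × Int :=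
  if h : (size : Int) ≤ index then lubyLoop1 index (2 * size + 1) (maxPower + 1)
  else (size, maxPower)
termination_by (index + 1 - size).toNat
decreasing_by
  exact lubyLoop1_dec index size h

-- second while loop of A: shrink size = size // 2, subtracting blocks from index
def lubyLoop2 (size : Nat) (index maxPower : Int) : Int :=
  if (size : Int) ≤ index + 1 then maxPower
  else if h0 : size = 0 then maxPower   -- Python loops forever here (index ≤ -2); excluded by Pre_
  else
    let size' := size / 2
    if (size' : Int) ≤ index then lubyLoop2 size' (index - size') (maxPower - 1)
    else lubyLoop2 size' index (maxPower - 1)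
termination_by size
decreasing_by all_goals exact Nat.div_lt_self (Nat.pos_of_ne_zero h0) Nat.one_lt_two

def luby (index : Int) : Int :=
  let r := lubyLoop1 index 1 0
  lubyLoop2 r.1 index r.2

-- ===== PORT B =====
-- termination measure lemma for findK (cited by name in decreasing_by)
theorem findK_dec (j : Int) (k : Nat) (h : 2 ^ k - 1 < j) :
    (j - ((k + 1 : Nat) : Int)).toNat < (j - (k : Int)).toNat := by
  have : (k : Int) < 2 ^ k := by exact_mod_cast Nat.lt_two_pow_self
  push_cast
  omega

-- the while loop of B: smallest k (from start k) with 2^k - 1 ≥ j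
def findK (j : Int) (k : Nat) : Nat :=
  if h : 2 ^ k - 1 < j then findK j (k + 1) else k
termination_by (j - k).toNat
decreasing_by
  exact findK_dec j k h

-- findK termination facts for luby_alt (cited by name in decreasing_by)
theorem findK_ge (j : Int) (k : Nat) : k ≤ findK j k ∧ j ≤ 2 ^ (findK j k) - 1 := by
  induction k using findK.induct (j := j) with
  | case1 k h ih =>
      rw [findK, dif_pos h]
      exact ⟨Nat.le_of_succ_le ih.1, ih.2⟩
  | case2 k h =>
      rw [findK, dif_neg h]
      omega

theorem findK_min (j : Int) (k : Nat) (hne : findK j k ≠ k) :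
    2 ^ (findK j k - 1) - 1 < j := by
  induction k using findK.induct (j := j) with
  | case1 k h ih =>
      rw [findK, dif_pos h] at hne ⊢
      by_cases he : findK j (k + 1) = k + 1
      · rw [he]; simpa using h
      · exact ih he
  | case2 k h =>
      rw [findK, dif_neg h] at hne
      exact absurd rfl hne

theorem findK_zero_facts (index : Int) (hk : findK (index + 1) 0 ≠ 0)
    (hne : index + 1 ≠ 2 ^ (findK (index + 1) 0) - 1) :
    2 ≤ findK (index + 1) 0 ∧ (1:Int) ≤ 2 ^ (findK (index + 1) 0 - 1) - 1 := by
  set k := findK (index + 1) 0 with hkdef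
  have hmin : 2 ^ (k - 1) - 1 < index + 1 := findK_min _ _ hk
  have hub : index + 1 ≤ 2 ^ k - 1 := (findK_ge (index + 1) 0).2
  have hk1 : k ≠ 1 := by
    intro h1
    rw [h1] at hmin hub hne
    simp at hmin hub
    omega
  have hk2 : 2 ≤ k := by omega
  constructor
  · exact hk2
  · have : (2:Int) ^ 1 ≤ 2 ^ (k - 1) := by
      apply pow_le_pow_right₀ (by norm_num) (by omega)
    simpa using by omega

-- termination measure lemma for luby_alt (cited by name in decreasing_by)
theorem luby_alt_dec (index : Int)
    (hj : ¬ index + 1 = 2 ^ (findK (index + 1) 0) - 1) (hk : ¬ findK (index + 1) 0 = 0) :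
    (index - (2 ^ (findK (index + 1) 0 - 1) - 1) + 1).toNat < (index + 1).toNat := by
  have h := findK_zero_facts index hk hj
  have hmin : 2 ^ (findK (index + 1) 0 - 1) - 1 < index + 1 := findK_min _ _ hk
  omega

def luby_alt (index : Int) : Int :=
  let j := index + 1
  let k := findK j 0
  if hj : j = 2 ^ k - 1 then (k : Int) - 1
  else if hk : k = 0 then 0   -- Python raises ValueError here (negative shift); only index ≤ -2, excluded by Pre_
  else luby_alt (index - (2 ^ (k - 1) - 1))
termination_by (index + 1).toNat
decreasing_by
  exact luby_alt_dec index hj hk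

-- ===== PRECONDITION & SPEC =====
-- Pre_ excludes index ≤ -2, where Python A loops forever (never returns).
def Pre_luby (index : Int) : Prop := -1 ≤ index
instance (index : Int) : Decidable (Pre_luby index) := by unfold Pre_luby; infer_instance
def pvWitness_luby : Int := 6

def Spec_luby (index : Int) (out : Int) : Prop := out = luby_alt index
instance (index : Int) (out : Int) : Decidable (Spec_luby index out) := by unfold Spec_luby; infer_instance

-- ===== CLAIM (what is proved, stated in full; the proofs are below) =====
def Claim_equal_luby : Prop := ∀ (index : Int), Dom_luby index → Pre_luby index → Spec_luby index (luby index)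


-- ===== LEMMAS AND PROOFS =====

theorem cast_pow_sub_one (m : Nat) : (((2:Nat) ^ m - 1 : Nat) : Int) = (2:Int) ^ m - 1 := by
  have h1 : 1 ≤ (2:Nat) ^ m := Nat.one_le_two_pow
  push_cast [h1]
  ring

theorem two_pow_split (m : Nat) (hm : 1 ≤ m) : (2:Nat) ^ m = 2 * 2 ^ (m - 1) := by
  conv_lhs => rw [show m = (m - 1) + 1 by omega]
  rw [pow_succ]
  ring

theorem two_pow_split_int (m : Nat) (hm : 1 ≤ m) : (2:Int) ^ m = 2 * 2 ^ (m - 1) := by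
  conv_lhs => rw [show m = (m - 1) + 1 by omega]
  rw [pow_succ]
  ring

-- A's first loop, started at size = 2^m - 1, lands exactly at findK (index+1) m.
theorem loop1_findK (index : Int) (m : Nat) :
    lubyLoop1 index ((2:Nat) ^ m - 1) ((m : Int) - 1) =
      ((2:Nat) ^ (findK (index + 1) m) - 1, (findK (index + 1) m : Int) - 1) := by
  induction m using findK.induct (j := index + 1) with
  | case1 m h ih =>
      rw [findK, dif_pos h]
      rw [lubyLoop1]
      rw [dif_pos (by rw [cast_pow_sub_one]; omega)]
      have hs : 2 * ((2:Nat) ^ m - 1) + 1 = 2 ^ (m + 1) - 1 := by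
        have h1 : 1 ≤ (2:Nat) ^ m := Nat.one_le_two_pow
        have h2 : (2:Nat) ^ (m + 1) = 2 * 2 ^ m := by rw [pow_succ]; ring
        omega
      have hp : (m:Int) - 1 + 1 = ((m + 1 : Nat) : Int) - 1 := by push_cast; ring
      rw [hs, hp]
      exact ih
  | case2 m h =>
      rw [findK, dif_neg h]
      rw [lubyLoop1]
      rw [dif_neg (by rw [cast_pow_sub_one]; omega)]

-- findK j 1 is the unique m ≥ 1 with 2^(m-1)-1 < j ≤ 2^m-1
theorem findK_one_unique (j : Int) (m : Nat) (hm : 1 ≤ m)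
    (hlo : (2:Int) ^ (m - 1) - 1 < j) (hhi : j ≤ (2:Int) ^ m - 1) :
    findK j 1 = m := by
  have hge := findK_ge j 1
  set K := findK j 1 with hK
  by_contra hne
  rcases Nat.lt_or_ge K m with hlt | hge2
  · -- K < m: 2^K ≤ 2^(m-1), contradiction with j ≤ 2^K - 1 and 2^(m-1)-1 < j
    have : (2:Int) ^ K ≤ 2 ^ (m - 1) := by
      apply pow_le_pow_right₀ (by norm_num) (by omega)
    omega
  · have hKm : m < K := by omega
    have hK1 : K ≠ 1 := by omega
    have hmin : 2 ^ (K - 1) - 1 < j := findK_min j 1 (by omega)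
    have : (2:Int) ^ m ≤ 2 ^ (K - 1) := by
      apply pow_le_pow_right₀ (by norm_num) (by omega)
    omega

-- luby index, for index ≥ 0, equals the second loop started at level findK (index+1) 1
theorem luby_eq_loop2 (index : Int) :
    luby index = lubyLoop2 ((2:Nat) ^ (findK (index + 1) 1) - 1) index
      ((findK (index + 1) 1 : Int) - 1) := by
  have h := loop1_findK index 1
  have e1 : (2:Nat) ^ 1 - 1 = 1 := by norm_num
  have e2 : ((1:Nat) : Int) - 1 = 0 := by norm_num
  rw [e1, e2] at h
  rw [luby, h]

-- BRIDGE: the second loop entered at any level m above the landing level computes luby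
theorem bridge (m : Nat) (index : Int) (h0 : 0 ≤ index)
    (hub : index + 1 ≤ (2:Int) ^ m - 1) :
    lubyLoop2 ((2:Nat) ^ m - 1) index ((m : Int) - 1) = luby index := by
  induction m using Nat.strong_induction_on generalizing index with
  | _ m ih =>
  have hm1 : 1 ≤ m := by
    by_contra hc
    have hm0 : m = 0 := by omega
    rw [hm0] at hub
    norm_num at hub
    omega
  have hdiv : ((2:Nat) ^ m - 1) / 2 = 2 ^ (m - 1) - 1 := by
    have := two_pow_split m hm1
    have h1 : 1 ≤ (2:Nat) ^ (m - 1) := Nat.one_le_two_pow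
    omega
  by_cases hcase : index + 1 ≤ (2:Int) ^ (m - 1) - 1
  · -- still above the landing level: one pure halving step
    have hm2 : 2 ≤ m := by
      by_contra hc
      have : m = 1 := by omega
      subst this
      simp at hcase
      omega
    rw [lubyLoop2]
    rw [if_neg (by
      rw [cast_pow_sub_one]
      have := two_pow_split_int m hm1
      have h1 : (1:Int) ≤ (2:Int) ^ (m-1) := one_le_pow₀ (by norm_num)
      omega)]
    rw [dif_neg (by
      intro hc
      have h1 : 1 ≤ (2:Nat) ^ m := Nat.one_le_two_pow
      have := two_pow_split m hm1
      have h2 : 1 ≤ (2:Nat) ^ (m-1) := Nat.one_le_two_pow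
      omega)]
    simp only [hdiv]
    rw [if_neg (by rw [cast_pow_sub_one]; omega)]
    have hp : (m:Int) - 1 - 1 = ((m - 1 : Nat) : Int) - 1 := by
      push_cast [hm1]; ring
    rw [hp]
    exact ih (m - 1) (by omega) index h0 hcase
  · -- landing level: this is exactly where luby's first loop lands
    have hK : findK (index + 1) 1 = m := findK_one_unique _ m hm1 (by omega) hub
    rw [luby_eq_loop2, hK]

theorem main_ind (index : Int) (hpre : -1 ≤ index) : luby index = luby_alt index := by
  induction hn : (index + 1).toNat using Nat.strong_induction_on generalizing index with
  | _ n ih =>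
  rcases eq_or_lt_of_le hpre with hneg | hpos
  · -- index = -1: both return -1
    have : index = -1 := by omega
    subst this
    have hA : luby (-1) = -1 := by
      have e1 : lubyLoop1 (-1) 1 0 = (1, 0) := by
        rw [lubyLoop1]; norm_num
      have e2 : lubyLoop2 1 (-1) 0 = lubyLoop2 0 (-1) (-1) := by
        rw [lubyLoop2]; norm_num
      have e3 : lubyLoop2 0 (-1) (-1) = -1 := by
        rw [lubyLoop2]; norm_num
      rw [luby, e1, e2, e3]
    have hf : findK 0 0 = 0 := by rw [findK]; norm_num
    have hB : luby_alt (-1) = -1 := by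
      rw [luby_alt]
      norm_num [hf]
    rw [hA, hB]
  · -- index ≥ 0
    have h0 : 0 ≤ index := by omega
    have hstep : findK (index + 1) 0 = findK (index + 1) 1 := by
      rw [findK]; rw [dif_pos (by norm_num; omega)]
    set k := findK (index + 1) 0 with hk
    have hub : index + 1 ≤ (2:Int) ^ k - 1 := (findK_ge (index + 1) 0).2
    have hk1 : 1 ≤ k := by
      rw [hstep]; exact (findK_ge (index + 1) 1).1
    by_cases hj : index + 1 = (2:Int) ^ k - 1
    · -- top of block: both return k - 1
      rw [luby_alt]
      rw [dif_pos hj]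
      rw [luby_eq_loop2, ← hstep]
      rw [lubyLoop2]
      rw [if_pos (by rw [cast_pow_sub_one]; omega)]
    · -- inner position: both recurse to index - (2^(k-1) - 1)
      have hfacts := findK_zero_facts index (by omega) hj
      rw [← hk] at hfacts
      have hmin : (2:Int) ^ (k - 1) - 1 < index + 1 := findK_min _ _ (by omega)
      have hk2 : 2 ≤ k := hfacts.1
      have hsplit := two_pow_split_int k hk1
      set index' := index - ((2:Int) ^ (k - 1) - 1) with hidx
      have h0' : 0 ≤ index' := by omega
      have hub' : index' + 1 ≤ (2:Int) ^ (k - 1) - 1 := by omega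
      have hlt : index' < index := by
        have := hfacts.2; omega
      -- A's side: one iteration of the second loop, then bridge at level k-1
      have hA : luby index = lubyLoop2 ((2:Nat) ^ (k - 1) - 1) index' (((k - 1 : Nat) : Int) - 1) := by
        rw [luby_eq_loop2, ← hstep]
        rw [lubyLoop2]
        rw [if_neg (by rw [cast_pow_sub_one]; omega)]
        rw [dif_neg (by
          intro hc
          have h1 : 1 ≤ (2:Nat) ^ (k - 1) := Nat.one_le_two_pow
          have h2 := two_pow_split k hk1
          omega)]
        have hdiv : ((2:Nat) ^ k - 1) / 2 = 2 ^ (k - 1) - 1 := by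
          have := two_pow_split k hk1
          have h1 : 1 ≤ (2:Nat) ^ (k - 1) := Nat.one_le_two_pow
          omega
        simp only [hdiv]
        rw [if_pos (by rw [cast_pow_sub_one]; omega)]
        rw [cast_pow_sub_one]
        have hp : (k:Int) - 1 - 1 = ((k - 1 : Nat) : Int) - 1 := by push_cast [hk1]; ring
        rw [hp, ← hidx]
      rw [hA, bridge (k - 1) index' h0' hub']
      rw [luby_alt]
      rw [dif_neg hj, dif_neg (by omega : ¬ k = 0)]
      exact ih (index' + 1).toNat (by omega) index' (by omega) rfl

-- ===== VERDICT (by name: the statement is the Claim_ definition above) =====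
theorem luby_spec : Claim_equal_luby := by
  intro index _ hpre
  exact main_ind index hpre
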